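-- pv_equiv track=rewrite | github.com/ArvHor/perceived-route-complexity | weighting_algorithms.py | calculate_instruction_equivalent
-- ===== SOURCE A (Python) =====
-- import itertools
--
-- def calculate_instruction_equivalent(bearing_list):
--     """How many turns at a decision point can be described with the same linguistic label?"""
--     bearing_difference_list = []
--     if len(bearing_list) > 1:
--         for bearing_a, bearing_b in itertools.combinations(bearing_list, 2):
--             bearing_difference = bearing_b - bearing_a
--             bearing_difference = bearing_difference % 360
--
--             if bearing_difference > 180:
--                 bearing_difference -= 360
--             elif bearing_difference < -180:
--                 bearing_difference += 360
--
--             bearing_difference_list.append(bearing_difference)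
--
--         if bearing_difference_list:
--             zero_to_ninety = len([bearing for bearing in bearing_difference_list if 0 < bearing < 90])
--             ninety_to_oneeighty = len([bearing for bearing in bearing_difference_list if 90 < bearing < 180])
--             minus_ninety_to_zero = len([bearing for bearing in bearing_difference_list if -90 < bearing < 0])
--             minus_oneeighty_to_minus_ninety = len([bearing for bearing in bearing_difference_list if -180 < bearing < -90])
--             max_count = max(zero_to_ninety, ninety_to_oneeighty, minus_ninety_to_zero, minus_oneeighty_to_minus_ninety, 1)
--             return max_count
--         else:
--             return 1
--     else:
--         return 1
-- ===== SOURCE B (Python) =====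
-- def calculate_instruction_equivalent(bearing_list):
--     """How many turns at a decision point can be described with the same linguistic label?"""
--     # One left-to-right pass: a counter of residues mod 360 of the elements seen so far;
--     # each new element adds, per 90-degree sector, the number of earlier elements whose
--     # residue falls in the matching circular window.  O(n) instead of O(n^2) pairs.
--     cnt = {}
--     s1 = s2 = s3 = s4 = 0
--     for b in bearing_list:
--         r = b % 360
--         s1 += sum(cnt.get((r - k) % 360, 0) for k in range(1, 90))
--         s2 += sum(cnt.get((r - k) % 360, 0) for k in range(91, 180))
--         s4 += sum(cnt.get((r - k) % 360, 0) for k in range(181, 270))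
--         s3 += sum(cnt.get((r - k) % 360, 0) for k in range(271, 360))
--         cnt[r] = cnt.get(r, 0) + 1
--     return max(s1, s2, s3, s4, 1)
-- ===== Notes on version B (the rewrite author's own statement) =====
-- stated objective: faster
-- what changed: Replaces the O(n^2) scan over all itertools.combinations pairs by a single left-to-right pass that keeps a counter of residues mod 360 and, for each element, adds the number of earlier residues lying in each of the four circular 90-degree windows.
import Mathlib
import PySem

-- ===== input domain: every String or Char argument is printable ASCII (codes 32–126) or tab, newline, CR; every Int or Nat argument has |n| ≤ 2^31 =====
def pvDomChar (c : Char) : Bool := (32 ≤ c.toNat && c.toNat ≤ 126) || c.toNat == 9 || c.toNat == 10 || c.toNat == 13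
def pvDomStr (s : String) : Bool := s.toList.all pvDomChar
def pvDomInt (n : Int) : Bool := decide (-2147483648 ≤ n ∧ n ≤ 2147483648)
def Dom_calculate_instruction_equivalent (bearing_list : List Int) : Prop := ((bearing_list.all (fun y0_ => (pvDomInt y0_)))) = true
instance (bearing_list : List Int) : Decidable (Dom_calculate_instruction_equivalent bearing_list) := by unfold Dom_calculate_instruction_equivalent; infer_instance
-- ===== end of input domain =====

-- B replaces A's O(n^2) scan of all pairs by a single left-to-right pass keeping a counter
-- of residues mod 360, counting per element the earlier residues in each 90-degree window
-- (objective: faster, asymptotic).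

-- ===== PORT A =====
def calculate_instruction_equivalent (bearing_list : List Int) : Int :=
  if bearing_list.length > 1 then
    -- for bearing_a, bearing_b in itertools.combinations(bearing_list, 2): … append(d)
    let bearing_difference_list : List Int :=
      (PySem.List.combinations bearing_list 2).foldl (fun acc c =>
        let bearing_a := c.getD 0 0   -- tuple unpacking of the 2-element combination
        let bearing_b := c.getD 1 0
        let d0 := PySem.Int.mod (bearing_b - bearing_a) 360
        let d := if d0 > 180 then d0 - 360 else if d0 < -180 then d0 + 360 else d0
        acc ++ [d]) []
    if bearing_difference_list ≠ [] then
      let zero_to_ninety : Int :=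
        (bearing_difference_list.filter (fun b => decide (0 < b) && decide (b < 90))).length
      let ninety_to_oneeighty : Int :=
        (bearing_difference_list.filter (fun b => decide (90 < b) && decide (b < 180))).length
      let minus_ninety_to_zero : Int :=
        (bearing_difference_list.filter (fun b => decide (-90 < b) && decide (b < 0))).length
      let minus_oneeighty_to_minus_ninety : Int :=
        (bearing_difference_list.filter (fun b => decide (-180 < b) && decide (b < -90))).length
      max (max (max (max zero_to_ninety ninety_to_oneeighty) minus_ninety_to_zero)
        minus_oneeighty_to_minus_ninety) 1
    else 1
  else 1

-- ===== PORT B =====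
-- one loop iteration of Source B: update the four sector sums from the counter, then count r
def pvAltStep (st : PySem.Dict Int Int × Int × Int × Int × Int) (b : Int) :
    PySem.Dict Int Int × Int × Int × Int × Int :=
  let (cnt, s1, s2, s3, s4) := st
  let r := PySem.Int.mod b 360
  let w : Int → Int → Int := fun lo hi =>
    ((PySem.List.pyRange lo hi 1).map (fun k => cnt.getD (PySem.Int.mod (r - k) 360) 0)).sum
  (cnt.insert r (cnt.getD r 0 + 1), s1 + w 1 90, s2 + w 91 180, s3 + w 271 360, s4 + w 181 270)

def calculate_instruction_equivalent_alt (bearing_list : List Int) : Int :=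
  let st := bearing_list.foldl pvAltStep (PySem.Dict.empty, 0, 0, 0, 0)
  max (max (max (max st.2.1 st.2.2.1) st.2.2.2.1) st.2.2.2.2) 1

-- ===== PRECONDITION & SPEC =====
def Spec_calculate_instruction_equivalent (bearing_list : List Int) (out : Int) : Prop := out = calculate_instruction_equivalent_alt bearing_list
instance (bearing_list : List Int) (out : Int) : Decidable (Spec_calculate_instruction_equivalent bearing_list out) := by unfold Spec_calculate_instruction_equivalent; infer_instance

-- ===== CLAIM (what is proved, stated in full; the proofs are below) =====
def Claim_equal_calculate_instruction_equivalent : Prop := ∀ (bearing_list : List Int), Dom_calculate_instruction_equivalent bearing_list → Spec_calculate_instruction_equivalent bearing_list (calculate_instruction_equivalent bearing_list)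

-- ===== LEMMAS AND PROOFS =====

theorem pvmod360 (a : Int) : PySem.Int.mod a 360 = a % 360 :=
  PySem.Int.mod_eq_emod_of_pos (by norm_num)

-- the raw pairwise difference (b - a) % 360 of a 2-element combination
def pvD0 (c : List Int) : Int := (c.getD 1 0 - c.getD 0 0) % 360

-- number of pairs (in order) whose raw difference lies in [lo, hi)
def pvS (lo hi : Int) (l : List Int) : Int :=
  ((PySem.List.combinations l 2).countP (fun c => decide (lo ≤ pvD0 c ∧ pvD0 c < hi)) : Int)

-- counter of residues mod 360 of the processed prefix
def pvCnt (pre : List Int) : PySem.Dict Int Int :=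
  pre.foldl (fun d x => d.insert (x % 360) (d.getD (x % 360) 0 + 1)) PySem.Dict.empty

def pvState (pre : List Int) : PySem.Dict Int Int × Int × Int × Int × Int :=
  (pvCnt pre, pvS 1 90 pre, pvS 91 180 pre, pvS 271 360 pre, pvS 181 270 pre)

theorem pv_countP_comb_append (l : List Int) (b : Int) (p : List Int → Bool) :
    (PySem.List.combinations (l ++ [b]) 2).countP p
      = (PySem.List.combinations l 2).countP p + l.countP (fun x => p [x, b]) := by
  induction l with
  | nil =>
      simp [PySem.List.combinations_cons_succ, PySem.List.combinations_nil_succ]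
  | cons x l ih =>
      simp only [List.cons_append, PySem.List.combinations_cons_succ,
        PySem.List.combinations_one, List.countP_append, List.countP_map, List.countP_cons,
        List.map_append, List.map_cons, List.map_nil, ih]
      simp [Function.comp_def]
      omega

theorem pv_getD_pvCnt (pre : List Int) (v : Int) :
    (pvCnt pre).getD v 0 = ((pre.map (· % 360)).count v : Int) := by
  unfold pvCnt
  rw [← List.foldl_map (f := fun x : Int => x % 360)
    (g := fun (d : PySem.Dict Int Int) x => d.insert x (d.getD x 0 + 1))]
  rw [PySem.Dict.getD_foldl_insert_add_one]
  simp

theorem pv_ind_sum (r lo hi m : Int) (h0 : 0 ≤ lo) (h1 : hi ≤ 360) (hm0 : 0 ≤ m)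
    (hm1 : m < 360) :
    ((PySem.List.pyRange lo hi 1).map (fun k => if m = (r - k) % 360 then (1 : Int) else 0)).sum
      = if lo ≤ (r - m) % 360 ∧ (r - m) % 360 < hi then 1 else 0 := by
  have hcong : ∀ k ∈ PySem.List.pyRange lo hi 1,
      (if m = (r - k) % 360 then (1 : Int) else 0)
        = (if (k == (r - m) % 360) = true then (1 : Int) else 0) := by
    intro k hk
    rw [PySem.List.mem_pyRange_one] at hk
    have : (m = (r - k) % 360) ↔ (k = (r - m) % 360) := by omega
    simp [this]
  rw [List.map_congr_left hcong, PySem.List.sum_map_ite_one_zero]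
  have hcount : (PySem.List.pyRange lo hi 1).countP (fun k => k == (r - m) % 360)
      = (PySem.List.pyRange lo hi 1).count ((r - m) % 360) := rfl
  rw [hcount]
  by_cases h : lo ≤ (r - m) % 360 ∧ (r - m) % 360 < hi
  · rw [List.count_eq_one_of_mem (PySem.List.nodup_pyRange_one _ _)
      (by rw [PySem.List.mem_pyRange_one]; exact h)]
    simp [h]
  · rw [List.count_eq_zero_of_not_mem (by rw [PySem.List.mem_pyRange_one]; exact h)]
    simp [h]

theorem pv_wsum (pre : List Int) (r lo hi : Int) (h0 : 0 ≤ lo) (h1 : hi ≤ 360) :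
    ((PySem.List.pyRange lo hi 1).map
        (fun k => ((pre.map (· % 360)).count ((r - k) % 360) : Int))).sum
      = (pre.countP
          (fun x => decide (lo ≤ (r - x % 360) % 360 ∧ (r - x % 360) % 360 < hi)) : Int) := by
  induction pre with
  | nil => simp
  | cons x pre ih =>
      have hsplit : ∀ k : Int,
          (((x :: pre).map (· % 360)).count ((r - k) % 360) : Int)
            = ((pre.map (· % 360)).count ((r - k) % 360) : Int)
              + (if x % 360 = (r - k) % 360 then (1 : Int) else 0) := by
        intro k
        simp only [List.map_cons, List.count_cons]
        push_cast
        by_cases h : x % 360 = (r - k) % 360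
        · simp [h]
        · simp [h]
      calc ((PySem.List.pyRange lo hi 1).map
              (fun k => (((x :: pre).map (· % 360)).count ((r - k) % 360) : Int))).sum
          = ((PySem.List.pyRange lo hi 1).map
              (fun k => ((pre.map (· % 360)).count ((r - k) % 360) : Int)
                + (if x % 360 = (r - k) % 360 then (1 : Int) else 0))).sum := by
            exact congrArg List.sum (List.map_congr_left (fun k _ => hsplit k))
        _ = ((PySem.List.pyRange lo hi 1).map
              (fun k => ((pre.map (· % 360)).count ((r - k) % 360) : Int))).sum
            + ((PySem.List.pyRange lo hi 1).map
              (fun k => if x % 360 = (r - k) % 360 then (1 : Int) else 0)).sum := by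
            exact PySem.List.sum_map_add_int _ _ _
        _ = (pre.countP (fun x => decide (lo ≤ (r - x % 360) % 360 ∧ (r - x % 360) % 360 < hi)) : Int)
            + (if lo ≤ (r - x % 360) % 360 ∧ (r - x % 360) % 360 < hi then 1 else 0) := by
            rw [ih, pv_ind_sum r lo hi (x % 360) h0 h1 (Int.emod_nonneg x (by norm_num))
              (Int.emod_lt_of_pos x (by norm_num))]
        _ = _ := by
            rw [List.countP_cons]
            push_cast
            simp

theorem pv_step (pre : List Int) (b : Int) :
    pvAltStep (pvState pre) b = pvState (pre ++ [b]) := by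
  have hS : ∀ lo hi : Int, 0 ≤ lo → hi ≤ 360 →
      pvS lo hi pre
        + ((PySem.List.pyRange lo hi 1).map
            (fun k => (pvCnt pre).getD ((b % 360 - k) % 360) 0)).sum
        = pvS lo hi (pre ++ [b]) := by
    intro lo hi h0 h1
    unfold pvS
    rw [pv_countP_comb_append]
    have hmap : ((PySem.List.pyRange lo hi 1).map
        (fun k => (pvCnt pre).getD ((b % 360 - k) % 360) 0)).sum
        = (pre.countP (fun x =>
            decide (lo ≤ (b % 360 - x % 360) % 360 ∧ (b % 360 - x % 360) % 360 < hi)) : Int) := by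
      have := pv_wsum pre (b % 360) lo hi h0 h1
      rw [← this]
      exact congrArg List.sum (List.map_congr_left (fun k _ => by rw [pv_getD_pvCnt]))
    have hpred : pre.countP (fun x => decide (lo ≤ pvD0 [x, b] ∧ pvD0 [x, b] < hi))
        = pre.countP (fun x =>
            decide (lo ≤ (b % 360 - x % 360) % 360 ∧ (b % 360 - x % 360) % 360 < hi)) := by
      apply List.countP_congr
      intro x _
      have h1 : pvD0 [x, b] = (b - x) % 360 := rfl
      have : pvD0 [x, b] = (b % 360 - x % 360) % 360 := by rw [h1]; omega
      rw [this]
    rw [hmap]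
    push_cast
    rw [hpred]
  have hcnt : (pvCnt pre).insert (b % 360) ((pvCnt pre).getD (b % 360) 0 + 1)
      = pvCnt (pre ++ [b]) := by
    unfold pvCnt
    rw [List.foldl_append]
    rfl
  simp only [pvAltStep, pvState, pvmod360]
  refine Prod.ext ?_ (Prod.ext ?_ (Prod.ext ?_ (Prod.ext ?_ ?_))) <;> simp only
  · exact hcnt
  · exact hS 1 90 (by norm_num) (by norm_num)
  · exact hS 91 180 (by norm_num) (by norm_num)
  · exact hS 271 360 (by norm_num) (by norm_num)
  · exact hS 181 270 (by norm_num) (by norm_num)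

theorem pv_foldl (l pre : List Int) :
    l.foldl pvAltStep (pvState pre) = pvState (pre ++ l) := by
  induction l generalizing pre with
  | nil => simp
  | cons x l ih =>
      rw [List.foldl_cons, pv_step, ih]
      congr 1
      simp

theorem pv_alt_eq (bl : List Int) :
    calculate_instruction_equivalent_alt bl
      = max (max (max (max (pvS 1 90 bl) (pvS 91 180 bl)) (pvS 271 360 bl))
          (pvS 181 270 bl)) 1 := by
  unfold calculate_instruction_equivalent_alt
  have h0 : (PySem.Dict.empty, (0 : Int), (0 : Int), (0 : Int), (0 : Int)) = pvState [] := by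
    unfold pvState pvCnt pvS
    simp [PySem.List.combinations_nil_succ]
  rw [h0, pv_foldl, List.nil_append]
  rfl

theorem pv_a_count (bl : List Int) (p : Int → Bool) :
    ((((PySem.List.combinations bl 2).foldl (fun acc c =>
        let bearing_a := c.getD 0 0
        let bearing_b := c.getD 1 0
        let d0 := PySem.Int.mod (bearing_b - bearing_a) 360
        let d := if d0 > 180 then d0 - 360 else if d0 < -180 then d0 + 360 else d0
        acc ++ [d]) []).filter p).length : Int)
    = ((PySem.List.combinations bl 2).countP (fun c =>
        let d0 := (c.getD 1 0 - c.getD 0 0) % 360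
        p (if d0 > 180 then d0 - 360 else if d0 < -180 then d0 + 360 else d0)) : Int) := by
  rw [PySem.List.foldl_append_singleton_eq_map, List.nil_append, List.filter_map,
    List.length_map, ← List.countP_eq_length_filter]
  norm_cast
  apply List.countP_congr
  intro c _
  simp [Function.comp]

theorem pv_sector (bl : List Int) (plo phi lo hi : Int)
    (h : ∀ d0 : Int, 0 ≤ d0 → d0 < 360 →
      ((plo < (if d0 > 180 then d0 - 360 else if d0 < -180 then d0 + 360 else d0)
        ∧ (if d0 > 180 then d0 - 360 else if d0 < -180 then d0 + 360 else d0) < phi)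
        ↔ (lo ≤ d0 ∧ d0 < hi))) :
    ((((PySem.List.combinations bl 2).foldl (fun acc c =>
        let bearing_a := c.getD 0 0
        let bearing_b := c.getD 1 0
        let d0 := PySem.Int.mod (bearing_b - bearing_a) 360
        let d := if d0 > 180 then d0 - 360 else if d0 < -180 then d0 + 360 else d0
        acc ++ [d]) []).filter (fun b => decide (plo < b) && decide (b < phi))).length : Int)
    = pvS lo hi bl := by
  rw [pv_a_count]
  unfold pvS
  norm_cast
  apply List.countP_congr
  intro c _
  simp only [pvD0, Bool.and_eq_true, decide_eq_true_eq]
  exact h _ (Int.emod_nonneg _ (by norm_num)) (Int.emod_lt_of_pos _ (by norm_num))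

-- ===== VERDICT (by name: the statement is the Claim_ definition above) =====
theorem calculate_instruction_equivalent_spec : Claim_equal_calculate_instruction_equivalent := by
  intro bl _
  unfold Spec_calculate_instruction_equivalent
  rw [pv_alt_eq]
  unfold calculate_instruction_equivalent
  by_cases hlen : bl.length > 1
  · simp only [hlen, if_true]
    by_cases hnil : (PySem.List.combinations bl 2).foldl (fun acc c =>
        let bearing_a := c.getD 0 0
        let bearing_b := c.getD 1 0
        let d0 := PySem.Int.mod (bearing_b - bearing_a) 360
        let d := if d0 > 180 then d0 - 360 else if d0 < -180 then d0 + 360 else d0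
        acc ++ [d]) [] = []
    · have hc : PySem.List.combinations bl 2 = [] := by
        rw [PySem.List.foldl_append_singleton_eq_map, List.nil_append] at hnil
        exact List.map_eq_nil_iff.mp hnil
      have hz : ∀ lo hi : Int, pvS lo hi bl = 0 := by
        intro lo hi; unfold pvS; rw [hc]; simp
      simp only [hnil, hz]
      norm_num
    · simp only [hnil, if_true, ne_eq, not_false_iff]
      rw [pv_sector bl 0 90 1 90 (by intro d0 h0 h1; constructor <;> (intro; omega)),
        pv_sector bl 90 180 91 180 (by intro d0 h0 h1; constructor <;> (intro; omega)),
        pv_sector bl (-90) 0 271 360 (by intro d0 h0 h1; constructor <;> (intro; omega)),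
        pv_sector bl (-180) (-90) 181 270 (by intro d0 h0 h1; constructor <;> (intro; omega))]
  · simp only [hlen, if_false]
    have hc : PySem.List.combinations bl 2 = [] :=
      PySem.List.combinations_eq_nil_of_length_lt bl (by omega)
    have hz : ∀ lo hi : Int, pvS lo hi bl = 0 := by
      intro lo hi; unfold pvS; rw [hc]; simp
    simp [hz]
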